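-- pv_equiv track=rewrite | github.com/avllgrn/2CM8Parcial1 | ejemplo.py | generaMatrizConteoArrAbaIzqDer
-- ===== SOURCE A (Python) =====
-- def generaMatrizCeros(m, n):
--     M = []
--     for i in range(m):
--         fila = []
--         for j in range(n):
--             fila.append( 0 )
--         M.append( fila )
--     return M
--
-- def generaMatrizConteoArrAbaIzqDer(m, n, ini, inc):
--     M = generaMatrizCeros(m,n)
--
--     contador = ini
--     for j in range(n):
--         for i in range(m):
--             M[i][j] = contador
--             contador += inc
--
--     return M
-- ===== SOURCE B (Python) =====
-- def generaMatrizConteoArrAbaIzqDer(m, n, ini, inc):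
--     # closed form: the value written at row i, column j is ini + inc*(j*m + i)
--     return [[ini + inc * (j * m + i) for j in range(n)] for i in range(m)]
-- ===== Notes on version B (the rewrite author's own statement) =====
-- stated objective: simpler
-- what changed: Replaces the zero-matrix allocation plus column-major in-place fill with a running counter by a single nested comprehension computing each entry from the closed form ini + inc*(j*m + i).
import Mathlib
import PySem

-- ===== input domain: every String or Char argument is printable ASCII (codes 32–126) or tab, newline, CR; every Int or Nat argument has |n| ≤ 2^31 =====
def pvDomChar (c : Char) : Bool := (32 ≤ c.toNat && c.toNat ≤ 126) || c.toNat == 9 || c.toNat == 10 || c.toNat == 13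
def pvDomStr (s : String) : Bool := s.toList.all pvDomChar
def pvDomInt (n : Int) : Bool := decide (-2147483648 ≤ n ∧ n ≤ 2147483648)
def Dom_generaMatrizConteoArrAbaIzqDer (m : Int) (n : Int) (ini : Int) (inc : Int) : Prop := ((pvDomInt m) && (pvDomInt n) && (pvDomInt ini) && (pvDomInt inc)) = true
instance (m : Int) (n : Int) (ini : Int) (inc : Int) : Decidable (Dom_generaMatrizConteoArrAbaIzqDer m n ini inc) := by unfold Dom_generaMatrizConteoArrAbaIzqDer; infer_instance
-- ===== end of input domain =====

-- B replaces A's zero-matrix allocation + column-major in-place fill with a running counter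
-- by a nested comprehension computing each entry from the closed form ini + inc*(j*m+i) (ints, so exact).

-- ===== PORT A =====
-- helper of A; loop indices come from range(...) so they are nonnegative and .toNat below is exact
def generaMatrizCeros (m : Int) (n : Int) : List (List Int) :=
  (PySem.List.pyRange 0 m 1).foldl
    (fun M _i =>
      M ++ [(PySem.List.pyRange 0 n 1).foldl (fun fila _j => fila ++ [(0 : Int)]) []]) []

def generaMatrizConteoArrAbaIzqDer (m : Int) (n : Int) (ini : Int) (inc : Int) : List (List Int) :=
  let M := generaMatrizCeros m n
  let st := (PySem.List.pyRange 0 n 1).foldl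
    (fun (s : List (List Int) × Int) j =>
      (PySem.List.pyRange 0 m 1).foldl
        (fun (t : List (List Int) × Int) i =>
          (t.1.modify i.toNat (fun fila => fila.set j.toNat t.2), t.2 + inc)) s)
    (M, ini)
  st.1

-- ===== PORT B =====
def generaMatrizConteoArrAbaIzqDer_alt (m : Int) (n : Int) (ini : Int) (inc : Int) : List (List Int) :=
  (PySem.List.pyRange 0 m 1).map (fun i =>
    (PySem.List.pyRange 0 n 1).map (fun j => ini + inc * (j * m + i)))

-- ===== PRECONDITION & SPEC =====
def Spec_generaMatrizConteoArrAbaIzqDer (m : Int) (n : Int) (ini : Int) (inc : Int) (out : List (List Int)) : Prop := out = generaMatrizConteoArrAbaIzqDer_alt m n ini inc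
instance (m : Int) (n : Int) (ini : Int) (inc : Int) (out : List (List Int)) : Decidable (Spec_generaMatrizConteoArrAbaIzqDer m n ini inc out) := by unfold Spec_generaMatrizConteoArrAbaIzqDer; infer_instance

-- ===== CLAIM (what is proved, stated in full; the proofs are below) =====
def Claim_equal_generaMatrizConteoArrAbaIzqDer : Prop := ∀ (m : Int) (n : Int) (ini : Int) (inc : Int), Dom_generaMatrizConteoArrAbaIzqDer m n ini inc → Spec_generaMatrizConteoArrAbaIzqDer m n ini inc (generaMatrizConteoArrAbaIzqDer m n ini inc)

-- ===== LEMMAS AND PROOFS =====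

-- the state-transformer of A's inner loop, for fixed column jn and increment inc
def pvStepI (jn : Nat) (inc : Int) (t : List (List Int) × Int) (i : Nat) : List (List Int) × Int :=
  (t.1.modify i (fun fila => fila.set jn t.2), t.2 + inc)

theorem foldl_append_const {α β : Type} (c : β) :
    ∀ (l : List α) (acc : List β),
      l.foldl (fun a (_ : α) => a ++ [c]) acc = acc ++ List.replicate l.length c := by
  intro l
  induction l with
  | nil => intro acc; simp
  | cons x xs ih =>
      intro acc
      simp [List.foldl_cons, ih, List.replicate_succ]

theorem generaMatrizCeros_eq (m n : Int) :
    generaMatrizCeros m n =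
      (List.range m.toNat).map (fun _ => List.replicate n.toNat (0 : Int)) := by
  unfold generaMatrizCeros
  rw [foldl_append_const, foldl_append_const]
  simp [List.map_const']

theorem foldl_pvStepI_shift (jn : Nat) (inc : Int) :
    ∀ (L : List Nat) (h : List Int) (rs : List (List Int)) (c : Int),
      L.foldl (fun t i => pvStepI jn inc t (i + 1)) (h :: rs, c)
        = ((h :: (L.foldl (pvStepI jn inc) (rs, c)).1),
           (L.foldl (pvStepI jn inc) (rs, c)).2) := by
  intro L
  induction L with
  | nil => intro h rs c; rfl
  | cons x xs ih =>
      intro h rs c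
      simp only [List.foldl_cons]
      have hstep : pvStepI jn inc (h :: rs, c) (x + 1)
          = (h :: (rs.modify x (fun fila => fila.set jn c)), c + inc) := by
        simp [pvStepI, List.modify]
      rw [hstep, ih]
      rfl

theorem inner_fold_eq (jn : Nat) (inc : Int) :
    ∀ (k : Nat) (f : Nat → List Int) (c : Int),
      (List.range k).foldl (pvStepI jn inc) ((List.range k).map f, c)
        = ((List.range k).map (fun i => (f i).set jn (c + inc * i)), c + inc * k) := by
  intro k
  induction k with
  | zero => intro f c; simp
  | succ k ih =>
      intro f c
      rw [List.range_succ_eq_map]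
      simp only [List.map_cons, List.foldl_cons, List.foldl_map, List.map_map, Function.comp_def]
      have hstep : pvStepI jn inc (f 0 :: (List.range k).map (fun i => f i.succ), c) 0
          = ((f 0).set jn c :: (List.range k).map (fun i => f i.succ), c + inc) := by
        simp [pvStepI, List.modify]
      rw [hstep]
      have := foldl_pvStepI_shift jn inc (List.range k)
        ((f 0).set jn c) ((List.range k).map (fun i => f i.succ)) (c + inc)
      simp only [Nat.succ_eq_add_one] at this ⊢
      rw [this, ih (fun i => f (i + 1)) (c + inc)]
      simp only [Prod.mk.injEq, List.cons.injEq]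
      refine ⟨⟨by norm_num, ?_⟩, by push_cast; ring⟩
      apply List.map_congr_left
      intro i _
      congr 1
      push_cast
      ring

-- row i of A's matrix after the first t columns have been written (t ≤ N columns of N)
def pvRow (mI ini inc : Int) (N t i : Nat) : List Int :=
  (List.range t).map (fun (j : Nat) => ini + inc * ((j : Int) * mI + (i : Int))) ++ List.replicate (N - t) 0

theorem set_at_prefix_length (l1 : List Int) :
    ∀ (x : Int) (l2 : List Int) (v : Int),
      (l1 ++ x :: l2).set l1.length v = l1 ++ v :: l2 := by
  induction l1 with
  | nil => intro x l2 v; simp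
  | cons a as ih => intro x l2 v; simp [ih]

theorem pvRow_set (mI ini inc : Int) (N t i : Nat) (ht : t < N) (v : Int)
    (hv : v = ini + inc * ((t : Int) * mI + (i : Int))) :
    (pvRow mI ini inc N t i).set t v = pvRow mI ini inc N (t + 1) i := by
  unfold pvRow
  have hrep : List.replicate (N - t) (0 : Int) = 0 :: List.replicate (N - (t + 1)) 0 := by
    have : N - t = (N - (t + 1)) + 1 := by omega
    rw [this, List.replicate_succ]
  rw [hrep]
  have h := set_at_prefix_length ((List.range t).map (fun (j : Nat) => ini + inc * ((j : Int) * mI + (i : Int)))) 0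
    (List.replicate (N - (t + 1)) 0) v
  rw [List.length_map, List.length_range] at h
  rw [h, List.range_succ]
  simp [hv]

theorem outer_fold_eq (ini inc : Int) (Mk N : Nat) :
    ∀ (t : Nat), t ≤ N →
      (List.range t).foldl (fun s j => (List.range Mk).foldl (pvStepI j inc) s)
          ((List.range Mk).map (fun i => pvRow (Mk : Int) ini inc N 0 i), ini)
        = ((List.range Mk).map (fun i => pvRow (Mk : Int) ini inc N t i),
           ini + inc * ((Mk : Int) * (t : Int))) := by
  intro t
  induction t with
  | zero => intro _; simp
  | succ t ih =>
      intro ht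
      rw [List.range_succ, List.foldl_append]
      rw [ih (by omega)]
      simp only [List.foldl_cons, List.foldl_nil]
      rw [inner_fold_eq t inc Mk (fun i => pvRow (Mk : Int) ini inc N t i) (ini + inc * ((Mk : Int) * (t : Int)))]
      simp only [Prod.mk.injEq]
      refine ⟨?_, by push_cast; ring⟩
      apply List.map_congr_left
      intro i _
      apply pvRow_set (Mk : Int) ini inc N t i (by omega)
      ring

theorem generaMatriz_eq_closed (m n ini inc : Int) :
    generaMatrizConteoArrAbaIzqDer m n ini inc
      = (List.range m.toNat).map (fun (i : Nat) =>
          (List.range n.toNat).map (fun (j : Nat) => ini + inc * ((j : Int) * (m.toNat : Int) + (i : Int)))) := by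
  unfold generaMatrizConteoArrAbaIzqDer
  rw [generaMatrizCeros_eq]
  simp only [PySem.List.pyRange_one, List.foldl_map, zero_add, Int.sub_zero, Int.toNat_natCast]
  have hfun : (fun (s : List (List Int) × Int) (j : Nat) =>
        List.foldl (fun (t : List (List Int) × Int) (i : Nat) =>
          (t.1.modify i (fun fila => fila.set j t.2), t.2 + inc)) s (List.range m.toNat))
      = (fun s j => (List.range m.toNat).foldl (pvStepI j inc) s) := by
    funext s j; rfl
  rw [hfun]
  have hz : (List.range m.toNat).map (fun _ => List.replicate n.toNat (0 : Int))
      = (List.range m.toNat).map (fun i => pvRow (m.toNat : Int) ini inc n.toNat 0 i) := by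
    apply List.map_congr_left; intro i _; simp [pvRow]
  rw [hz, outer_fold_eq ini inc m.toNat n.toNat n.toNat (le_refl _)]
  simp only
  apply List.map_congr_left
  intro i _
  simp [pvRow]

-- ===== VERDICT (by name: the statement is the Claim_ definition above) =====
theorem generaMatrizConteoArrAbaIzqDer_spec : Claim_equal_generaMatrizConteoArrAbaIzqDer := by
  intro m n ini inc _
  unfold Spec_generaMatrizConteoArrAbaIzqDer generaMatrizConteoArrAbaIzqDer_alt
  rw [generaMatriz_eq_closed]
  simp only [PySem.List.pyRange_one, List.map_map, zero_add, Int.sub_zero]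
  rcases le_or_gt 0 m with hm | hm
  · apply List.map_congr_left
    intro i _
    simp only [Function.comp_def]
    apply List.map_congr_left
    intro j _
    rw [Int.toNat_of_nonneg hm]
  · have h0 : m.toNat = 0 := by omega
    simp [h0]
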